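-- pv_equiv track=rewrite | github.com/cirubiano/basketball-clipper | backend/app/services/detector.py | _fill_with_horizon
-- ===== SOURCE A (Python) =====
-- def _fill_with_horizon(
--     seq: list[tuple[int, str | None]],
--     max_fill: int,
-- ) -> list[tuple[int, str | None]]:
--     """
--     Forward-fill ``None`` con la última label conocida, pero sólo hasta
--     ``max_fill`` frames consecutivos. Más allá de ese umbral, el gap
--     permanece como ``None`` — así dos posesiones separadas por un periodo
--     largo sin balón quedan como segmentos distintos en vez de fusionarse.
--
--     También hace backward-fill al inicio (Nones antes del primer label
--     conocido), también con horizonte.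
--     """
--     out: list[tuple[int, str | None]] = []
--     last_label: str | None = None
--     fill_used = 0
--
--     for fi, t in seq:
--         if t is not None:
--             out.append((fi, t))
--             last_label = t
--             fill_used = 0
--         elif last_label is not None and fill_used < max_fill:
--             out.append((fi, last_label))
--             fill_used += 1
--         else:
--             out.append((fi, None))
--
--     # Backward-fill las leading Nones
--     last_label = None
--     fill_used = 0
--     for i in range(len(out) - 1, -1, -1):
--         fi, t = out[i]
--         if t is not None:
--             last_label = t
--             fill_used = 0
--         elif last_label is not None and fill_used < max_fill:
--             out[i] = (fi, last_label)
--             fill_used += 1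
--     return out
-- ===== SOURCE B (Python) =====
-- def _fill_with_horizon(seq, max_fill):
--     # Single gap-oriented pass: locate each maximal run of None labels and fill
--     # it by a closed rule (left label wins within max_fill of the left known
--     # entry, otherwise the right label if within max_fill of the right one).
--     n = len(seq)
--     i = 0
--     while i < n and seq[i][1] is None:
--         i += 1
--     if i == n:
--         return list(seq)
--     first_lab = seq[i][1]
--     # leading gap: backward-filled from the first known label
--     out = [(f, first_lab if i - k <= max_fill else None)
--            for k, (f, _) in enumerate(seq[:i])]
--     while i < n:
--         fi, s = seq[i]  # known entry
--         out.append((fi, s))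
--         g = i + 1
--         while g < n and seq[g][1] is None:
--             g += 1
--         L = g - i - 1  # gap length
--         for k in range(1, L + 1):
--             f = seq[i + k][0]
--             if k <= max_fill:
--                 out.append((f, s))
--             elif g < n and L + 1 - k <= max_fill:
--                 out.append((f, seq[g][1]))
--             else:
--                 out.append((f, None))
--         i = g
--     return out
-- ===== Notes on version B (the rewrite author's own statement) =====
-- stated objective: alternative
-- what changed: A's forward fill sweep followed by a second reversed in-place sweep is replaced by a single gap-oriented pass that locates each maximal run of None labels and fills every run position by a closed distance rule from its two boundary labels (left label wins within max_fill of the left boundary, else right label within max_fill of the right boundary).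
import Mathlib
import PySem

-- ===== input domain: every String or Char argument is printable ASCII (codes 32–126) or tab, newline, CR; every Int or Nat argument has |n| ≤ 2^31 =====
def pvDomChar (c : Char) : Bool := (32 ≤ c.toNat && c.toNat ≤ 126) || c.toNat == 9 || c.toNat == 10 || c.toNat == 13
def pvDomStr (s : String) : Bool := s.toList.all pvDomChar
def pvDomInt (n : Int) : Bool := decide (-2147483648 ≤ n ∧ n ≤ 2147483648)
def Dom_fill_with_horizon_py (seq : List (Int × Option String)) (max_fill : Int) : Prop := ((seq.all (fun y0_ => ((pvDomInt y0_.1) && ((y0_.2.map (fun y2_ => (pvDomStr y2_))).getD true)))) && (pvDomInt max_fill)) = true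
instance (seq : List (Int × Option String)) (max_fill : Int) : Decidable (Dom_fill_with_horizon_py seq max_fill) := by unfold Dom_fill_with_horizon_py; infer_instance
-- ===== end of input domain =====

-- B replaces A's forward sweep plus reversed second sweep by a single gap-oriented pass
-- that fills each maximal None-run from its two boundary labels by a closed distance rule
-- (objective: alternative decomposition, same O(n) cost).

-- ===== PORT A =====
-- The single state machine both of A's loops run: on a known label emit it and reset the
-- state, on None fill from `last` while `used < max_fill`, else leave None.
def fwdAux (mf : Int) (last : Option String) (used : Int) :
    List (Int × Option String) → List (Int × Option String)
  | [] => []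
  | (fi, t) :: rest =>
    match t with
    | some s => (fi, some s) :: fwdAux mf (some s) 0 rest
    | none =>
      if last.isSome ∧ used < mf then (fi, last) :: fwdAux mf last (used + 1) rest
      else (fi, none) :: fwdAux mf last used rest

-- A: forward pass, then the in-place loop over indices len-1 … 0.  That loop writes only
-- index i, reading state produced from indices > i, so it is ported exactly as the same
-- state machine run over the reversed list, with the order restored by a final reverse.
def fill_with_horizon_py (seq : List (Int × Option String)) (max_fill : Int) :
    List (Int × Option String) :=
  let out := fwdAux max_fill none 0 seq
  (fwdAux max_fill none 0 out.reverse).reverse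

-- ===== PORT B =====
-- Source B's leading-gap comprehension: entry number k (counter k) gets the first known label
-- iff i - k ≤ max_fill, where i is the index of the first known entry.
def fillLead (mf : Int) (s : String) (i k : Int) :
    List (Int × Option String) → List (Int × Option String)
  | [] => []
  | (f, _) :: gs => (f, if i - k ≤ mf then some s else none) :: fillLead mf s i (k + 1) gs

-- Source B's inner `for k in range(1, L+1)` loop over one gap: left label within max_fill of
-- the left boundary, else right label (if it exists) within max_fill of the right boundary.
def fillGap (mf : Int) (s : String) (right : Option String) (L k : Int) :
    List (Int × Option String) → List (Int × Option String)
  | [] => []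
  | (f, _) :: gs =>
    (f, if k ≤ mf then some s
        else if right.isSome ∧ L + 1 - k ≤ mf then right else none) ::
      fillGap mf s right L (k + 1) gs

-- Source B's outer while loop after the first known entry: current label s, then the maximal
-- None-run (takeWhile) and the rest (dropWhile); recurse at the next known entry.
def runWalk (mf : Int) (s : String) (rest : List (Int × Option String)) :
    List (Int × Option String) :=
  match h : rest.dropWhile (fun p => p.2.isNone) with
  | [] =>
      fillGap mf s none ((rest.takeWhile (fun p => p.2.isNone)).length) 1
        (rest.takeWhile (fun p => p.2.isNone))
  | (fj, some s') :: rest3 =>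
      fillGap mf s (some s') ((rest.takeWhile (fun p => p.2.isNone)).length) 1
        (rest.takeWhile (fun p => p.2.isNone)) ++ (fj, some s') :: runWalk mf s' rest3
  | (_, none) :: _ => []   -- unreachable: the head of dropWhile has a non-None label
termination_by rest.length
decreasing_by
  have h2 := List.length_dropWhile_le (fun p => p.2.isNone) rest
  rw [h] at h2
  simp at h2
  omega

def fill_with_horizon_py_alt (seq : List (Int × Option String)) (max_fill : Int) :
    List (Int × Option String) :=
  match seq.dropWhile (fun p => p.2.isNone) with
  | [] => seq
  | (fi, some s) :: rest =>
      fillLead max_fill s ((seq.takeWhile (fun p => p.2.isNone)).length) 0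
        (seq.takeWhile (fun p => p.2.isNone)) ++ (fi, some s) :: runWalk max_fill s rest
  | (_, none) :: _ => seq   -- unreachable

-- ===== PRECONDITION & SPEC =====
def Spec_fill_with_horizon_py (seq : List (Int × Option String)) (max_fill : Int) (out : List (Int × Option String)) : Prop := out = fill_with_horizon_py_alt seq max_fill
instance (seq : List (Int × Option String)) (max_fill : Int) (out : List (Int × Option String)) : Decidable (Spec_fill_with_horizon_py seq max_fill out) := by unfold Spec_fill_with_horizon_py; infer_instance

-- ===== CLAIM (what is proved, stated in full; the proofs are below) =====
def Claim_equal_fill_with_horizon_py : Prop := ∀ (seq : List (Int × Option String)) (max_fill : Int), Dom_fill_with_horizon_py seq max_fill → Spec_fill_with_horizon_py seq max_fill (fill_with_horizon_py seq max_fill)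

-- ===== LEMMAS AND PROOFS =====

def allNone (xs : List (Int × Option String)) : Prop := ∀ p ∈ xs, p.2 = none
def allSome (xs : List (Int × Option String)) : Prop := ∀ p ∈ xs, p.2.isSome

-- closed form of the state machine on an all-None list with a known last label
def gapFill (mf : Int) (s : String) (u : Int) :
    List (Int × Option String) → List (Int × Option String)
  | [] => []
  | (f, _) :: gs => (f, if u < mf then some s else none) :: gapFill mf s (u + 1) gs

theorem fwdAux_allNone_none (mf : Int) (u : Int) (xs : List (Int × Option String))
    (h : allNone xs) : fwdAux mf none u xs = xs := by
  induction xs generalizing u with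
  | nil => rfl
  | cons p rest ih =>
    obtain ⟨f, t⟩ := p
    have ht : t = none := h (f, t) (by simp)
    subst ht
    simp only [fwdAux, Option.isSome_none, Bool.false_eq_true, false_and, if_false]
    exact congrArg _ (ih u (fun q hq => h q (List.mem_cons_of_mem _ hq)))

theorem fwdAux_allSome (mf : Int) (l : Option String) (u : Int)
    (xs : List (Int × Option String)) (h : allSome xs) : fwdAux mf l u xs = xs := by
  induction xs generalizing l u with
  | nil => rfl
  | cons p rest ih =>
    obtain ⟨f, t⟩ := p
    have ht : t.isSome := h (f, t) (by simp)
    obtain ⟨s, rfl⟩ := Option.isSome_iff_exists.mp ht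
    simp only [fwdAux]
    exact congrArg _ (ih (some s) 0 (fun q hq => h q (List.mem_cons_of_mem _ hq)))

theorem fwdAux_append_known (mf : Int) (l : Option String) (u : Int)
    (xs ys : List (Int × Option String)) (fj : Int) (s2 : String) :
    fwdAux mf l u (xs ++ (fj, some s2) :: ys) =
      fwdAux mf l u xs ++ (fj, some s2) :: fwdAux mf (some s2) 0 ys := by
  induction xs generalizing l u with
  | nil => rfl
  | cons p rest ih =>
    obtain ⟨f, t⟩ := p
    cases t with
    | some s => simp only [List.cons_append, fwdAux, ih]
    | none =>
      simp only [List.cons_append, fwdAux]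
      split
      · simp only [List.cons_append, ih]
      · simp only [List.cons_append, ih]

theorem fwdAux_append_allSome (mf : Int) (l : Option String) (u : Int)
    (xs ys : List (Int × Option String)) (h : allSome ys) :
    fwdAux mf l u (xs ++ ys) = fwdAux mf l u xs ++ ys := by
  induction xs generalizing l u with
  | nil => simpa using fwdAux_allSome mf l u ys h
  | cons p rest ih =>
    obtain ⟨f, t⟩ := p
    cases t with
    | some s => simp only [List.cons_append, fwdAux, ih]
    | none =>
      simp only [List.cons_append, fwdAux]
      split
      · simp only [List.cons_append, ih]
      · simp only [List.cons_append, ih]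

theorem gapFill_ge (mf : Int) (s : String) (u : Int) (xs : List (Int × Option String))
    (hu : mf ≤ u) : gapFill mf s u xs = xs.map (fun p => (p.1, none)) := by
  induction xs generalizing u with
  | nil => rfl
  | cons p rest ih =>
    obtain ⟨f, t⟩ := p
    simp only [gapFill, List.map_cons]
    rw [if_neg (by omega), ih (u + 1) (by omega)]

theorem fwdAux_some_ge (mf : Int) (s : String) (u : Int)
    (xs : List (Int × Option String)) (h : allNone xs) (hu : mf ≤ u) :
    fwdAux mf (some s) u xs = xs.map (fun p => (p.1, none)) := by
  induction xs generalizing u with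
  | nil => rfl
  | cons p rest ih =>
    obtain ⟨f, t⟩ := p
    have ht : t = none := h (f, t) (by simp)
    subst ht
    simp only [fwdAux, List.map_cons]
    rw [if_neg (by omega), ih u (fun q hq => h q (List.mem_cons_of_mem _ hq)) hu]

theorem fwdAux_allNone_some (mf : Int) (s : String) (u : Int)
    (xs : List (Int × Option String)) (h : allNone xs) :
    fwdAux mf (some s) u xs = gapFill mf s u xs := by
  induction xs generalizing u with
  | nil => rfl
  | cons p rest ih =>
    obtain ⟨f, t⟩ := p
    have ht : t = none := h (f, t) (by simp)
    subst ht
    have hrest : allNone rest := fun q hq => h q (List.mem_cons_of_mem _ hq)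
    by_cases hu : u < mf
    · simp only [fwdAux, gapFill]
      rw [if_pos ⟨rfl, hu⟩, if_pos hu, ih (u + 1) hrest]
    · simp only [fwdAux, gapFill]
      rw [if_neg (by simp [hu]), if_neg hu,
        fwdAux_some_ge mf s u rest hrest (by omega), gapFill_ge mf s (u + 1) rest (by omega)]

theorem gapFill_length (mf : Int) (s : String) (u : Int) (xs : List (Int × Option String)) :
    (gapFill mf s u xs).length = xs.length := by
  induction xs generalizing u with
  | nil => rfl
  | cons p rest ih => obtain ⟨f, t⟩ := p; simp only [gapFill, List.length_cons, ih]

theorem gapFill_getElem (mf : Int) (s : String) (u : Int) (xs : List (Int × Option String))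
    (j : Nat) (hj : j < xs.length) :
    (gapFill mf s u xs)[j]'(by rw [gapFill_length]; exact hj) =
      (xs[j].1, if u + (j : Int) < mf then some s else none) := by
  induction xs generalizing u j with
  | nil => simp at hj
  | cons p rest ih =>
    obtain ⟨f, t⟩ := p
    cases j with
    | zero => simp [gapFill]
    | succ j' =>
      have hj' : j' < rest.length := by simpa using hj
      have := ih (u + 1) j' hj'
      simp only [gapFill, List.getElem_cons_succ, this]
      congr 1
      have e : u + 1 + (j' : Int) = u + ((j' : Nat) + 1 : Nat) := by push_cast; ring
      rw [e]

theorem fillGap_length (mf : Int) (s : String) (r : Option String) (L k : Int)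
    (xs : List (Int × Option String)) : (fillGap mf s r L k xs).length = xs.length := by
  induction xs generalizing k with
  | nil => rfl
  | cons p rest ih => obtain ⟨f, t⟩ := p; simp only [fillGap, List.length_cons, ih]

theorem fillGap_getElem (mf : Int) (s : String) (r : Option String) (L k : Int)
    (xs : List (Int × Option String)) (j : Nat) (hj : j < xs.length) :
    (fillGap mf s r L k xs)[j]'(by rw [fillGap_length]; exact hj) =
      (xs[j].1, if k + (j : Int) ≤ mf then some s
                else if r.isSome ∧ L + 1 - (k + (j : Int)) ≤ mf then r else none) := by
  induction xs generalizing k j with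
  | nil => simp at hj
  | cons p rest ih =>
    obtain ⟨f, t⟩ := p
    cases j with
    | zero => simp [fillGap]
    | succ j' =>
      have hj' : j' < rest.length := by simpa using hj
      have := ih (k + 1) j' hj'
      simp only [fillGap, List.getElem_cons_succ, this]
      congr 1
      have e : k + 1 + (j' : Int) = k + ((j' : Nat) + 1 : Nat) := by push_cast; ring
      rw [e]

theorem fillLead_length (mf : Int) (s : String) (i k : Int)
    (xs : List (Int × Option String)) : (fillLead mf s i k xs).length = xs.length := by
  induction xs generalizing k with
  | nil => rfl
  | cons p rest ih => obtain ⟨f, t⟩ := p; simp only [fillLead, List.length_cons, ih]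

theorem fillLead_getElem (mf : Int) (s : String) (i k : Int)
    (xs : List (Int × Option String)) (j : Nat) (hj : j < xs.length) :
    (fillLead mf s i k xs)[j]'(by rw [fillLead_length]; exact hj) =
      (xs[j].1, if i - (k + (j : Int)) ≤ mf then some s else none) := by
  induction xs generalizing k j with
  | nil => simp at hj
  | cons p rest ih =>
    obtain ⟨f, t⟩ := p
    cases j with
    | zero => simp [fillLead]
    | succ j' =>
      have hj' : j' < rest.length := by simpa using hj
      have := ih (k + 1) j' hj'
      simp only [fillLead, List.getElem_cons_succ, this]
      congr 1
      have e : k + 1 + (j' : Int) = k + ((j' : Nat) + 1 : Nat) := by push_cast; ring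
      rw [e]

theorem fwdAux_append_allNone_none (mf : Int) (u : Int)
    (xs ys : List (Int × Option String)) (h : allNone xs) :
    fwdAux mf none u (xs ++ ys) = xs ++ fwdAux mf none u ys := by
  induction xs generalizing u with
  | nil => rfl
  | cons p rest ih =>
    obtain ⟨f, t⟩ := p
    have ht : t = none := h (f, t) (by simp)
    subst ht
    simp only [List.cons_append, fwdAux, Option.isSome_none, Bool.false_eq_true, false_and,
      if_false]
    exact congrArg _ (ih u (fun q hq => h q (List.mem_cons_of_mem _ hq)))

theorem fillGap_none_eq (mf : Int) (s : String) (L k : Int)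
    (xs : List (Int × Option String)) :
    fillGap mf s none L k xs = gapFill mf s (k - 1) xs := by
  induction xs generalizing k with
  | nil => rfl
  | cons p rest ih =>
    obtain ⟨f, t⟩ := p
    simp only [fillGap, gapFill, Option.isSome_none, Bool.false_eq_true, false_and, if_false]
    have e : k + 1 - 1 = k - 1 + 1 := by ring
    rw [ih (k + 1), e]
    by_cases hk : k ≤ mf
    · rw [if_pos hk, if_pos (by omega)]
    · rw [if_neg hk, if_neg (by omega)]

-- explicit split of gapFill at the fill horizon
theorem gapFill_split (mf : Int) (s : String) (xs : List (Int × Option String)) :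
    gapFill mf s 0 xs =
      (xs.take mf.toNat).map (fun p => (p.1, some s)) ++
      (xs.drop mf.toNat).map (fun p => (p.1, (none : Option String))) := by
  apply List.ext_getElem
  · simp [gapFill_length]; omega
  · intro j h1 h2
    have hx : j < xs.length := by simpa [gapFill_length] using h1
    have hlen : ((xs.take mf.toNat).map (fun p => (p.1, some s))).length =
        min mf.toNat xs.length := by simp
    rw [gapFill_getElem mf s 0 xs j hx]
    rw [List.getElem_append]
    split
    · rename_i h'
      rw [dif_pos (show j < ((xs.take mf.toNat).map (fun p => (p.1, some s))).length by
        rw [hlen]; omega)]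
      rw [List.getElem_map, List.getElem_take]
    · rename_i h'
      rw [dif_neg (show ¬ j < ((xs.take mf.toNat).map (fun p => (p.1, some s))).length by
        rw [hlen]; omega)]
      rw [List.getElem_map, List.getElem_drop]
      have hidx : mf.toNat +
          (j - ((xs.take mf.toNat).map (fun p => (p.1, some s))).length) = j := by
        rw [hlen]; omega
      rw [getElem_congr_idx hidx]

-- key: the reversed second sweep over one already-forward-filled gap equals B's closed rule
theorem allSome_revP (s : String) (xs : List (Int × Option String)) :
    allSome ((xs.map (fun p => (p.1, some s))).reverse) := by
  intro p hp
  simp only [List.mem_reverse, List.mem_map] at hp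
  obtain ⟨q, _, rfl⟩ := hp
  rfl

theorem allNone_revN (xs : List (Int × Option String)) :
    allNone ((xs.map (fun p => (p.1, (none : Option String)))).reverse) := by
  intro p hp
  simp only [List.mem_reverse, List.mem_map] at hp
  obtain ⟨q, _, rfl⟩ := hp
  rfl

theorem gap_second_sweep (mf : Int) (s s2 : String) (gap : List (Int × Option String)) :
    (fwdAux mf (some s2) 0 (gapFill mf s 0 gap).reverse).reverse =
      fillGap mf s (some s2) (gap.length : Int) 1 gap := by
  rw [gapFill_split, List.reverse_append,
    fwdAux_append_allSome mf (some s2) 0 _ _ (allSome_revP s _),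
    fwdAux_allNone_some mf s2 0 _ (allNone_revN _),
    List.reverse_append, List.reverse_reverse]
  apply List.ext_getElem
  · simp [gapFill_length, fillGap_length]; omega
  · intro j h1 h2
    have hx : j < gap.length := by rw [fillGap_length] at h2; exact h2
    have hlenP : ((gap.take mf.toNat).map (fun p => (p.1, some s))).length =
        min mf.toNat gap.length := by simp
    rw [fillGap_getElem mf s (some s2) (gap.length : Int) 1 gap j hx]
    rw [List.getElem_append]
    split
    · rename_i h'
      rw [hlenP] at h'
      rw [List.getElem_map, List.getElem_take, if_pos (by omega)]
    · rename_i h'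
      rw [hlenP] at h'
      have hm : mf.toNat ≤ gap.length := by omega
      rw [List.getElem_reverse]
      rw [gapFill_getElem mf s2 0 _ _ (by
        simp only [gapFill_length, List.length_reverse, List.length_map, List.length_drop,
          List.length_take]
        omega)]
      rw [List.getElem_reverse]
      rw [List.getElem_map, List.getElem_drop]
      simp only [gapFill_length, List.length_reverse, List.length_map, List.length_drop,
        List.length_take]
      have hidx : mf.toNat + (gap.length - mf.toNat - 1 -
          (gap.length - mf.toNat - 1 - (j - min mf.toNat gap.length))) = j := by omega
      rw [getElem_congr_idx hidx]
      rw [if_neg (show ¬ (1 + (j : Int) ≤ mf) by omega)]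
      by_cases hc : (gap.length : Int) + 1 - (1 + (j : Int)) ≤ mf
      · rw [if_pos (show (0 : Int) +
            ((gap.length - mf.toNat - 1 - (j - min mf.toNat gap.length) : Nat) : Int) < mf by
          omega)]
        rw [if_pos ⟨rfl, hc⟩]
      · rw [if_neg (show ¬ ((0 : Int) +
            ((gap.length - mf.toNat - 1 - (j - min mf.toNat gap.length) : Nat) : Int) < mf) by
          omega)]
        rw [if_neg (by
          intro hcc
          exact hc hcc.2)]

theorem gap_no_right (mf : Int) (s : String) (gap : List (Int × Option String)) :
    (fwdAux mf none 0 (gapFill mf s 0 gap).reverse).reverse =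
      fillGap mf s none (gap.length : Int) 1 gap := by
  rw [gapFill_split, List.reverse_append,
    fwdAux_append_allNone_none mf 0 _ _ (allNone_revN _),
    fwdAux_allSome mf none 0 _ (allSome_revP s _),
    List.reverse_append, List.reverse_reverse, List.reverse_reverse]
  rw [fillGap_none_eq]
  norm_num
  rw [gapFill_split]
  simp [List.map_take, List.map_drop]

theorem lead_fill_eq (mf : Int) (s : String) (lead : List (Int × Option String))
    (h : allNone lead) :
    (fwdAux mf (some s) 0 lead.reverse).reverse =
      fillLead mf s (lead.length : Int) 0 lead := by
  rw [fwdAux_allNone_some mf s 0 _ (by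
    intro p hp; exact h p (List.mem_reverse.mp hp))]
  apply List.ext_getElem
  · simp [gapFill_length, fillLead_length]
  · intro j h1 h2
    have hx : j < lead.length := by rw [fillLead_length] at h2; exact h2
    rw [fillLead_getElem mf s (lead.length : Int) 0 lead j hx]
    rw [List.getElem_reverse]
    rw [gapFill_getElem mf s 0 _ _ (by simp [gapFill_length]; omega)]
    rw [List.getElem_reverse]
    simp only [gapFill_length, List.length_reverse]
    have hidx : lead.length - 1 - (lead.length - 1 - j) = j := by omega
    rw [getElem_congr_idx hidx]
    by_cases hc : (lead.length : Int) - (0 + (j : Int)) ≤ mf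
    · rw [if_pos (by omega), if_pos hc]
    · rw [if_neg (by omega), if_neg hc]

theorem dropWhile_head_false {α : Type} (p : α → Bool) (xs : List α) (y : α)
    (ys : List α) (h : xs.dropWhile p = y :: ys) : p y = false := by
  induction xs with
  | nil => simp [List.dropWhile] at h
  | cons a as ih =>
    rw [List.dropWhile_cons] at h
    by_cases hp : p a = true
    · exact ih (by simpa [hp] using h)
    · rw [if_neg hp] at h
      obtain ⟨rfl, -⟩ := List.cons.inj h
      simpa using hp

theorem allNone_takeWhile (xs : List (Int × Option String)) :
    allNone (xs.takeWhile (fun p => p.2.isNone)) := by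
  intro p hp
  have := List.mem_takeWhile_imp hp
  exact Option.isNone_iff_eq_none.mp this

theorem runWalk_nil (mf : Int) (s : String) (rest : List (Int × Option String))
    (h : rest.dropWhile (fun p => p.2.isNone) = []) :
    runWalk mf s rest =
      fillGap mf s none ((rest.takeWhile (fun p => p.2.isNone)).length) 1
        (rest.takeWhile (fun p => p.2.isNone)) := by
  rw [runWalk]
  split
  · rfl
  · rename_i heq; rw [h] at heq; simp at heq
  · rename_i heq; rw [h] at heq; simp at heq

theorem runWalk_cons (mf : Int) (s s' : String) (rest rest3 : List (Int × Option String))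
    (fj : Int) (h : rest.dropWhile (fun p => p.2.isNone) = (fj, some s') :: rest3) :
    runWalk mf s rest =
      fillGap mf s (some s') ((rest.takeWhile (fun p => p.2.isNone)).length) 1
        (rest.takeWhile (fun p => p.2.isNone)) ++ (fj, some s') :: runWalk mf s' rest3 := by
  rw [runWalk]
  split
  · rename_i heq; rw [h] at heq; simp at heq
  · rename_i heq
    rw [h] at heq
    injection heq with h3 h4
    injection h3 with h5 h6
    injection h6 with h7
    subst h4; subst h5; subst h7
    rfl
  · rename_i heq
    rw [h] at heq
    injection heq with h3 h4
    simp [Prod.ext_iff] at h3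

theorem runWalk_eq (mf : Int) :
    ∀ (n : Nat) (rest : List (Int × Option String)), rest.length ≤ n → ∀ (s : String),
    (fwdAux mf none 0 (fwdAux mf (some s) 0 rest).reverse).reverse = runWalk mf s rest := by
  intro n
  induction n with
  | zero =>
    intro rest hlen s
    have hr : rest = [] := List.length_eq_zero_iff.mp (Nat.le_zero.mp hlen)
    subst hr
    rw [runWalk_nil mf s [] rfl]
    rfl
  | succ n ih =>
    intro rest hlen s
    cases hdw : rest.dropWhile (fun p => p.2.isNone) with
    | nil =>
      have hrest : rest = rest.takeWhile (fun p => p.2.isNone) := by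
        conv_lhs => rw [← List.takeWhile_append_dropWhile (p := fun p => p.2.isNone) (l := rest)]
        rw [hdw, List.append_nil]
      have hall : allNone rest := by
        intro q hq
        rw [hrest] at hq
        exact allNone_takeWhile rest q hq
      rw [fwdAux_allNone_some mf s 0 rest hall, gap_no_right mf s rest,
        runWalk_nil mf s rest hdw, ← hrest]
    | cons hd tl =>
      obtain ⟨fj, t⟩ := hd
      have hfalse := dropWhile_head_false _ rest _ _ hdw
      cases t with
      | none => simp at hfalse
      | some s' =>
        have hsplit : rest = rest.takeWhile (fun p => p.2.isNone) ++ (fj, some s') :: tl := by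
          conv_lhs => rw [← List.takeWhile_append_dropWhile (p := fun p => p.2.isNone) (l := rest)]
          rw [hdw]
        have hallg : allNone (rest.takeWhile (fun p => p.2.isNone)) := allNone_takeWhile rest
        have hlen3 : tl.length ≤ n := by
          have := congrArg List.length hsplit
          simp at this
          omega
        rw [runWalk_cons mf s s' rest tl fj hdw]
        conv_lhs => rw [hsplit]
        rw [fwdAux_append_known mf (some s) 0 _ tl fj s',
          fwdAux_allNone_some mf s 0 _ hallg,
          List.reverse_append, List.reverse_cons, List.append_assoc, List.singleton_append,
          fwdAux_append_known mf none 0 _ _ fj s',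
          List.reverse_append, List.reverse_cons, List.append_assoc, List.singleton_append,
          gap_second_sweep mf s s' _,
          ih tl hlen3 s']

-- ===== VERDICT (by name: the statement is the Claim_ definition above) =====
theorem fill_with_horizon_py_spec : Claim_equal_fill_with_horizon_py := by
  intro seq mf _
  unfold Spec_fill_with_horizon_py fill_with_horizon_py fill_with_horizon_py_alt
  cases hdw : seq.dropWhile (fun p => p.2.isNone) with
  | nil =>
    have hrest : seq = seq.takeWhile (fun p => p.2.isNone) := by
      conv_lhs => rw [← List.takeWhile_append_dropWhile (p := fun p => p.2.isNone) (l := seq)]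
      rw [hdw, List.append_nil]
    have hall : allNone seq := by
      intro q hq
      rw [hrest] at hq
      exact allNone_takeWhile seq q hq
    simp only []
    rw [fwdAux_allNone_none mf 0 seq hall,
      fwdAux_allNone_none mf 0 seq.reverse (by
        intro q hq; exact hall q (List.mem_reverse.mp hq)),
      List.reverse_reverse]
  | cons hd tl =>
    obtain ⟨fi, t⟩ := hd
    have hfalse := dropWhile_head_false _ seq _ _ hdw
    cases t with
    | none => simp at hfalse
    | some s =>
      have hsplit : seq = seq.takeWhile (fun p => p.2.isNone) ++ (fi, some s) :: tl := by
        conv_lhs => rw [← List.takeWhile_append_dropWhile (p := fun p => p.2.isNone) (l := seq)]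
        rw [hdw]
      have hallg : allNone (seq.takeWhile (fun p => p.2.isNone)) := allNone_takeWhile seq
      simp only []
      conv_lhs => rw [hsplit]
      rw [fwdAux_append_known mf none 0 _ tl fi s,
        fwdAux_allNone_none mf 0 _ hallg,
        List.reverse_append, List.reverse_cons, List.append_assoc, List.singleton_append,
        fwdAux_append_known mf none 0 _ _ fi s,
        List.reverse_append, List.reverse_cons, List.append_assoc, List.singleton_append,
        lead_fill_eq mf s _ hallg,
        runWalk_eq mf tl.length tl (le_refl _) s]
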